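-- pv_equiv track=rewrite | github.com/JingYiJun/Inspire-cli | inspire/cli/commands/hpc/hpc_commands.py | _normalize_status_filters
-- ===== SOURCE A (Python) =====
-- def _normalize_status_filters(statuses: tuple[str, ...]) -> list[str]:
--     normalized: list[str] = []
--     seen: set[str] = set()
--     for value in statuses:
--         status = str(value or "").strip().upper()
--         if not status or status in seen:
--             continue
--         seen.add(status)
--         normalized.append(status)
--     return normalized
-- ===== SOURCE B (Python) =====
-- def _normalize_status_filters(statuses: tuple[str, ...]) -> list[str]:
--     tokens = [t for t in (str(v or "").strip().upper() for v in statuses) if t]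
--     out: list[str] = []
--     while tokens:
--         head = tokens[0]
--         out.append(head)
--         tokens = [t for t in tokens[1:] if t != head]
--     return out
-- ===== Notes on version B (the rewrite author's own statement) =====
-- stated objective: alternative
-- what changed: Replaces the single forward pass that maintains a seen-set alongside the output with a normalize/filter pass followed by a filter-out dedup loop: repeatedly emit the head of the remaining token list and filter all its later duplicates out before continuing, so no membership structure is ever maintained.
import Mathlib
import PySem

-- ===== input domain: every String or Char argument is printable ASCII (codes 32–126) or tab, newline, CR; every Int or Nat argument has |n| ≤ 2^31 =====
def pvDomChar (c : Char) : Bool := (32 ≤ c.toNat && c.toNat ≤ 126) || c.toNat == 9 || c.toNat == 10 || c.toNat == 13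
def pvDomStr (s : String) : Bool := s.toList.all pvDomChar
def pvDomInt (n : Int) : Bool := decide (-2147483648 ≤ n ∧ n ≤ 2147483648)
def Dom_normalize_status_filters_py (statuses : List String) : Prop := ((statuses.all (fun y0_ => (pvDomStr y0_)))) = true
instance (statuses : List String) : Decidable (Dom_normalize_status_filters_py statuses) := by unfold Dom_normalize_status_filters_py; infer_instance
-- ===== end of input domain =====

-- B replaces A's single seen-set accumulation pass with normalize+filter then a filter-out dedup loop (no seen-set; alternative algorithm, quadratic worst case).


-- ===== PORT A =====
-- loop body: status = str(value or "").strip().upper(); skip if empty or seen; else append to normalized and add to seen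
def pvStepA (st : List String × PySem.Set String) (value : String) :
    List String × PySem.Set String :=
  let status := PySem.Str.upper (PySem.Str.strip (if value = "" then "" else value))
  if status = "" ∨ PySem.Set.contains st.2 status then st
  else (st.1 ++ [status], PySem.Set.add st.2 status)

def normalize_status_filters_py (statuses : List String) : List String :=
  (statuses.foldl pvStepA ([], PySem.Set.empty)).1

-- ===== PORT B =====
-- while tokens: emit head, filter it out of the tail; fuel = initial list length only
-- makes the loop structurally total, it never changes the computation (see pvDedupB_cons)
def pvDedupBGo : Nat → List String → List String → List String
  | _, out, [] => out
  | 0, out, _ => out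
  | n + 1, out, h :: rest => pvDedupBGo n (out ++ [h]) (rest.filter (fun t => t ≠ h))

def pvDedupB (l : List String) : List String := pvDedupBGo l.length [] l

-- tokens = [t for t in (str(v or "").strip().upper() …) if t]; then dedup(tokens)
def normalize_status_filters_py_alt (statuses : List String) : List String :=
  pvDedupB
    ((statuses.map (fun v =>
        PySem.Str.upper (PySem.Str.strip (if v = "" then "" else v)))).filter
      (fun t => t ≠ ""))

-- ===== PRECONDITION & SPEC =====
def Spec_normalize_status_filters_py (statuses : List String) (out : List String) : Prop := out = normalize_status_filters_py_alt statuses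
instance (statuses : List String) (out : List String) : Decidable (Spec_normalize_status_filters_py statuses out) := by unfold Spec_normalize_status_filters_py; infer_instance

-- ===== CLAIM =====
def Claim_equal_normalize_status_filters_py : Prop := ∀ (statuses : List String), Dom_normalize_status_filters_py statuses → Spec_normalize_status_filters_py statuses (normalize_status_filters_py statuses)

-- ===== LEMMAS AND PROOFS =====

-- the loop accumulator only collects output at the front
theorem pv_go_acc : ∀ (n : Nat) (out l : List String),
    pvDedupBGo n out l = out ++ pvDedupBGo n [] l := by
  intro n
  induction n with
  | zero => intro out l; cases l <;> simp [pvDedupBGo]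
  | succ n ih =>
    intro out l
    cases l with
    | nil => simp [pvDedupBGo]
    | cons h rest =>
      simp only [pvDedupBGo]
      rw [ih (out ++ [h]), ih ([] ++ [h])]
      simp

-- the fuel is irrelevant as long as it bounds the list length
theorem pv_go_fuel : ∀ (n m : Nat) (l : List String), l.length ≤ n → l.length ≤ m →
    pvDedupBGo n [] l = pvDedupBGo m [] l := by
  intro n
  induction n with
  | zero =>
    intro m l hn _
    have : l = [] := List.eq_nil_of_length_eq_zero (Nat.le_zero.mp hn)
    subst this
    cases m <;> rfl
  | succ n ih =>
    intro m l hn hm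
    cases l with
    | nil => cases m <;> rfl
    | cons h rest =>
      cases m with
      | zero => simp at hm
      | succ m' =>
        simp only [pvDedupBGo]
        rw [pv_go_acc n, pv_go_acc m']
        refine congrArg _ (ih m' _ ?_ ?_)
        · exact le_trans (List.length_filter_le _ _) (by simpa using hn)
        · exact le_trans (List.length_filter_le _ _) (by simpa using hm)

theorem pvDedupB_nil : pvDedupB [] = [] := rfl

theorem pvDedupB_cons (h : String) (rest : List String) :
    pvDedupB (h :: rest) = h :: pvDedupB (rest.filter (fun t => t ≠ h)) := by
  unfold pvDedupB
  simp only [List.length_cons, pvDedupBGo]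
  rw [pv_go_acc]
  exact congrArg _ (pv_go_fuel _ _ _ (List.length_filter_le _ _) le_rfl)

-- A's loop from a state whose accumulator and seen-set are the same list equals
-- folding Set.add over the normalized non-empty tokens.
theorem pv_loop_eq (xs : List String) (acc : List String) :
    (xs.foldl pvStepA (acc, acc)).1
    = ((xs.map (fun v =>
          PySem.Str.upper (PySem.Str.strip (if v = "" then "" else v)))).filter
        (fun t => t ≠ "")).foldl PySem.Set.add acc := by
  induction xs generalizing acc with
  | nil => rfl
  | cons x xs ih =>
    rw [List.foldl_cons, List.map_cons, List.filter_cons]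
    by_cases hx : PySem.Str.upper (PySem.Str.strip (if x = "" then "" else x)) = ""
    · have h1 : pvStepA (acc, acc) x = (acc, acc) := by
        simp [pvStepA, hx]
      rw [h1, ih]
      simp [hx]
    · by_cases hm : PySem.Str.upper (PySem.Str.strip (if x = "" then "" else x)) ∈ acc
      · have h1 : pvStepA (acc, acc) x = (acc, acc) := by
          simp [pvStepA, hm]
        rw [h1, ih]
        simp [hx, List.foldl_cons, PySem.Set.add_of_mem hm]
      · have h1 : pvStepA (acc, acc) x
            = (acc ++ [PySem.Str.upper (PySem.Str.strip (if x = "" then "" else x))],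
               acc ++ [PySem.Str.upper (PySem.Str.strip (if x = "" then "" else x))]) := by
          simp [pvStepA, hx, hm]
        rw [h1, ih]
        simp [hx, List.foldl_cons, PySem.Set.add_of_not_mem hm]

-- Folding Set.add over xs from acc appends exactly the filter-out dedup of the
-- elements of xs not already in acc.
theorem pv_foldl_add_eq_dedupB (xs : List String) (acc : List String) :
    xs.foldl PySem.Set.add acc = acc ++ pvDedupB (xs.filter (fun x => x ∉ acc)) := by
  induction xs generalizing acc with
  | nil => simp [pvDedupB_nil]
  | cons x xs ih =>
    rw [List.foldl_cons, List.filter_cons]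
    by_cases hx : x ∈ acc
    · rw [PySem.Set.add_of_mem hx, ih]
      simp [hx]
    · rw [PySem.Set.add_of_not_mem hx, ih, if_pos (by simpa using hx), pvDedupB_cons]
      have hf : xs.filter (fun a => a ∉ acc ++ [x])
          = (xs.filter (fun a => a ∉ acc)).filter (fun t => t ≠ x) := by
        rw [List.filter_filter]
        apply List.filter_congr
        intro a _
        by_cases h1 : a ∈ acc <;> by_cases h2 : a = x <;> simp [h1, h2]
      rw [hf]
      simp

-- ===== VERDICT =====
theorem normalize_status_filters_py_spec : Claim_equal_normalize_status_filters_py := by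
  intro statuses _
  show normalize_status_filters_py statuses = normalize_status_filters_py_alt statuses
  unfold normalize_status_filters_py normalize_status_filters_py_alt
  show (List.foldl pvStepA ([], ([] : List String)) statuses).1 = _
  rw [pv_loop_eq statuses [], pv_foldl_add_eq_dedupB]
  simp
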